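-- pv_equiv track=rewrite | github.com/Raspeball/adventofcode | 2021/day1-1.py | IsLarger
-- ===== SOURCE A (Python) =====
-- def IsLarger(list):
--
--     n_is_larger = 0
--     current = list[0]
--
--     for i in list:
--         if list.index(i) == 0:
--             continue
--         else:
--             if i > current:
--                 n_is_larger += 1
--
--         current = i
--
--     return n_is_larger
-- ===== SOURCE B (Python) =====
-- def IsLarger(list):
--     return sum(1 for a, b in zip(list, list[1:]) if b > a)
-- ===== Notes on version B (the rewrite author's own statement) =====
-- stated objective: simpler
-- what changed: Replaces A's running-current loop with its per-element list.index scan by a single zip pass over consecutive pairs counting all adjacent increases.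
-- intended difference: On nonempty lists containing a later run of the first value whose deletion changes an adjacent comparison, A returns the increase count of the list with all later copies of the first value deleted (its list.index(i)==0 test skips them, e.g. 0 on [2,1,2]), while B returns the count of all adjacent increases (1 there), the intended 'count elements larger than the previous one'. — e.g. on IsLarger([2, 1, 2]): A returns 0, B returns 1
import Mathlib
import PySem

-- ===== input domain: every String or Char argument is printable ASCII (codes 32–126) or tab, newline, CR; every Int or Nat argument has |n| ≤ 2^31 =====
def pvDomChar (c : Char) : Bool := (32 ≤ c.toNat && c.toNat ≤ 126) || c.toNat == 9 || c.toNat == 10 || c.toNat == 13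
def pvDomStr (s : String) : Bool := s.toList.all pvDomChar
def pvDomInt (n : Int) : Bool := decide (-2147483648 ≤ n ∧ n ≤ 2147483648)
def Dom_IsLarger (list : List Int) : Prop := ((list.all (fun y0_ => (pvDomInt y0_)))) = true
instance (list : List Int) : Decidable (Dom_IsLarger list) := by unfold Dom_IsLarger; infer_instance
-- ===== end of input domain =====

-- B counts all adjacent increases in one zip pass over consecutive pairs; A's loop with a
-- per-element list.index test skips every later occurrence of the first value, which D_
-- below marks as an intended difference. Proved: A = B on nonempty lists outside D_.

-- ===== PORT A =====
def IsLarger (list : List Int) : Int :=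
  match PySem.List.pyGet? list 0 with
  | none => 0   -- unreachable under Pre_: Python raises IndexError on []
  | some c0 =>
    (list.foldl (fun (st : Int × Int) i =>
      if PySem.List.index? list i = some 0 then st
      else ((if i > st.2 then st.1 + 1 else st.1), i)) (0, c0)).1

-- ===== PORT B =====
def IsLarger_alt (list : List Int) : Int :=
  ((list.zip list.tail).countP (fun p => decide (p.2 > p.1)) : Int)

-- ===== PRECONDITION & SPEC =====
-- Pre_ excludes only the empty list, on which Python A raises IndexError.
def Pre_IsLarger (list : List Int) : Prop := list ≠ []
instance (list : List Int) : Decidable (Pre_IsLarger list) := by unfold Pre_IsLarger; infer_instance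
def pvWitness_IsLarger : List Int := [1, 2, 1, 3]

-- D_ holds exactly on the inputs where A's skipping of later copies of the first value h
-- changes the answer: some maximal run of h in the tail, with predecessor p and (if any)
-- successor y, fails the local boundary relation [h>p] + [y>h] = [y>p] (for an end run:
-- h ≤ p). A returns the increase count with those copies deleted; B counts all adjacent
-- increases, the intended behaviour.
mutual
def pvGoodRun (h c : Int) : List Int → Bool
  | [] => decide (h ≤ c)
  | y :: ys =>
    if y = h then pvGoodRun h c ys
    else (decide (((if h > c then (1:Int) else 0) + (if y > h then 1 else 0))
                   = (if y > c then 1 else 0))) && pvGood h y ys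
def pvGood (h c : Int) : List Int → Bool
  | [] => true
  | x :: xs => if x = h then pvGoodRun h c xs else pvGood h x xs
end

def D_IsLarger (list : List Int) : Prop :=
  list ≠ [] ∧ pvGood list.headI list.headI list.tail = false
instance (list : List Int) : Decidable (D_IsLarger list) := by unfold D_IsLarger; infer_instance

def Spec_IsLarger (list : List Int) (out : Int) : Prop := ¬ D_IsLarger list → out = IsLarger_alt list
instance (list : List Int) (out : Int) : Decidable (Spec_IsLarger list out) := by unfold Spec_IsLarger; infer_instance

def pvDiffWitness_IsLarger : List Int := [2, 1, 2]
def pvDiffWitnessOut_IsLarger : Int × Int := (0, 1)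

-- ===== CLAIM (what is proved, stated in full; the proofs are below) =====
def Claim_unchanged_IsLarger : Prop := ∀ (list : List Int), Dom_IsLarger list → Pre_IsLarger list → Spec_IsLarger list (IsLarger list)
def Claim_changed_IsLarger : Prop := Dom_IsLarger (pvDiffWitness_IsLarger) ∧ Pre_IsLarger (pvDiffWitness_IsLarger) ∧ D_IsLarger (pvDiffWitness_IsLarger) ∧ IsLarger (pvDiffWitness_IsLarger) = pvDiffWitnessOut_IsLarger.1 ∧ IsLarger_alt (pvDiffWitness_IsLarger) = pvDiffWitnessOut_IsLarger.2 ∧ pvDiffWitnessOut_IsLarger.1 ≠ pvDiffWitnessOut_IsLarger.2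

-- ===== LEMMAS AND PROOFS =====

-- adjacent-increase count of c :: l
def cntInc (c : Int) (l : List Int) : Int :=
  match l with
  | [] => 0
  | x :: xs => (if x > c then 1 else 0) + cntInc x xs

theorem countP_eq_cntInc (c : Int) (l : List Int) :
    ((((c :: l).zip (c :: l).tail).countP (fun p => decide (p.2 > p.1)) : Nat) : Int) = cntInc c l := by
  induction l generalizing c with
  | nil => simp [cntInc]
  | cons x xs ih =>
    simp only [List.tail_cons, List.zip_cons_cons, List.countP_cons, cntInc]
    rw [← ih x]
    by_cases h : x > c <;> simp [h] <;> ring_nf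

theorem index?_head_iff (h i : Int) (t : List Int) :
    (PySem.List.index? (h :: t) i = some 0) ↔ i = h := by
  rw [PySem.List.index?_eq_some_iff]
  constructor
  · rintro ⟨pre, suf, heq, hlen, -⟩
    rw [List.length_eq_zero_iff] at hlen
    subst hlen
    simp only [List.nil_append, List.cons.injEq] at heq
    exact heq.1.symm
  · intro he
    subst he
    exact ⟨[], t, rfl, rfl, by simp⟩

theorem foldl_simple_eq_cntInc (h : Int) (t : List Int) (n c : Int) :
    (t.foldl (fun (st : Int × Int) i =>
      if i = h then st
      else ((if i > st.2 then st.1 + 1 else st.1), i)) (n, c)).1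
    = n + cntInc c (t.filter (fun x => x ≠ h)) := by
  induction t generalizing n c with
  | nil => simp [cntInc]
  | cons x xs ih =>
    by_cases hx : x = h
    · simp [List.foldl_cons, hx, ih]
    · simp only [List.foldl_cons, if_neg hx, List.filter_cons]
      rw [ih]
      by_cases hgt : x > c <;> simp [hx, hgt, cntInc] <;> ring_nf

theorem foldl_index?_eq_simple (h : Int) (full u : List Int) (st : Int × Int) :
    u.foldl (fun (st : Int × Int) i =>
      if PySem.List.index? (h :: full) i = some 0 then st
      else ((if i > st.2 then st.1 + 1 else st.1), i)) st
    = u.foldl (fun (st : Int × Int) i =>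
      if i = h then st
      else ((if i > st.2 then st.1 + 1 else st.1), i)) st := by
  congr 1
  funext st i
  rw [if_congr (index?_head_iff h i full) rfl rfl]

-- if every run of h in t passes the local boundary check, deleting the copies of h
-- does not change the adjacent-increase count
theorem good_filter_eq (h : Int) (t : List Int) : ∀ (c : Int),
    (pvGood h c t = true → cntInc c (t.filter (fun x => x ≠ h)) = cntInc c t)
    ∧ (pvGoodRun h c t = true →
        cntInc c (t.filter (fun x => x ≠ h)) = (if h > c then 1 else 0) + cntInc h t) := by
  induction t with
  | nil =>
    intro c
    refine ⟨fun _ => rfl, fun hg => ?_⟩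
    simp only [pvGoodRun, decide_eq_true_eq] at hg
    simp [cntInc, show ¬ h > c by omega]
  | cons x xs ih =>
    intro c
    constructor
    · intro hg
      simp only [pvGood] at hg
      by_cases hx : x = h
      · subst hx
        rw [if_pos rfl] at hg
        have hthis := (ih c).2 hg
        rw [List.filter_cons, if_neg (by simp)]
        simp only [cntInc]
        rw [hthis]
      · rw [if_neg hx] at hg
        have hthis := (ih x).1 hg
        rw [List.filter_cons, if_pos (by simp [hx])]
        simp only [cntInc]
        rw [hthis]
    · intro hg
      simp only [pvGoodRun] at hg
      by_cases hx : x = h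
      · subst hx
        rw [if_pos rfl] at hg
        have hthis := (ih c).2 hg
        rw [List.filter_cons, if_neg (by simp), hthis]
        simp [cntInc]
      · rw [if_neg hx, Bool.and_eq_true, decide_eq_true_eq] at hg
        obtain ⟨hb, hgood⟩ := hg
        have hthis := (ih x).1 hgood
        rw [List.filter_cons, if_pos (by simp [hx])]
        simp only [cntInc]
        rw [hthis]
        by_cases h1 : h > c <;> by_cases h2 : x > h <;> by_cases h3 : x > c <;>
          simp [h1, h2, h3] at hb ⊢

-- ===== VERDICT (by name: the statement is the Claim_ definition above) =====
theorem IsLarger_spec : Claim_unchanged_IsLarger := by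
  intro list _ hpre
  unfold Spec_IsLarger
  intro hnd
  match list with
  | [] => exact absurd rfl hpre
  | h :: t =>
    unfold IsLarger IsLarger_alt
    rw [PySem.List.pyGet?_zero_cons]
    simp only []
    rw [foldl_index?_eq_simple h t (h :: t) (0, h), List.foldl_cons, if_pos rfl,
        foldl_simple_eq_cntInc, countP_eq_cntInc]
    have hg : pvGood h h t = true := by
      unfold D_IsLarger at hnd
      simp only [List.headI, List.tail_cons, ne_eq, reduceCtorEq, not_false_eq_true, true_and] at hnd
      cases hb : pvGood h h t with
      | false => exact absurd (by simpa using hb) hnd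
      | true => rfl
    rw [(good_filter_eq h t h).1 hg]
    omega

theorem IsLarger_changed : Claim_changed_IsLarger := by unfold Claim_changed_IsLarger; decide
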